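-- pv_equiv track=rewrite | github.com/hajimurtaza/SadiHassan.github.io | leetGraph/seleniumTest.py | get_problem_name_from_html
-- ===== SOURCE A (Python) =====
-- def get_problem_name_from_html(str):
-- 	ans = "";
-- 	cat_start = False;
-- 	for i in range(0, len(str)):
-- 		if cat_start and str[i] == '<':
-- 			break;
-- 		if str[i] == '>':
-- 			cat_start = True
-- 			continue
-- 		if cat_start:
-- 			ans += str[i]
-- 	return ans
-- ===== SOURCE B (Python) =====
-- def get_problem_name_from_html(str):
--     i = str.find('>')
--     if i == -1:
--         return ""
--     j = str.find('<', i + 1)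
--     if j == -1:
--         j = len(str)
--     return str[i + 1:j].replace('>', '')
-- ===== Notes on version B (the rewrite author's own statement) =====
-- stated objective: faster
-- what changed: Replaces A's stateful flag-driven character-by-character loop with an index-search decomposition: find the first '>', find the next '<' (or end of string), slice between them and strip stray '>' characters with replace; the find/slice/replace builtins run at C speed instead of a Python-level per-character loop.
import Mathlib
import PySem

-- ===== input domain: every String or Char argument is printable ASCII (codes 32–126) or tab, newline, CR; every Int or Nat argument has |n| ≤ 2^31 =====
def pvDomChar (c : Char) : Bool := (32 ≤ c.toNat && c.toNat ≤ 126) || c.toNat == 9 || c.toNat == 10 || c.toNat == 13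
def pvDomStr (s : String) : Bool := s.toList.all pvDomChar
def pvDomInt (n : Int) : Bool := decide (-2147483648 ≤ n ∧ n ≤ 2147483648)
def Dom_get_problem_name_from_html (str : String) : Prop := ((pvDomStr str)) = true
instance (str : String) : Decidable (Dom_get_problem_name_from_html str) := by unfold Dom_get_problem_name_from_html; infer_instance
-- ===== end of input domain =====

-- B replaces A's flag-driven per-character loop by find + slice + replace (same O(n), measured faster via C-level builtins).

-- ===== PORT A =====
-- A's for-loop over the characters, with the `cat_start` flag and the `break`,
-- as structural recursion; branches in A's order, the cons builds `ans`.
def pvGoA : List Char → Bool → List Char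
  | [], _ => []
  | c :: rest, cat_start =>
    if cat_start && (c == '<') then []            -- break
    else if c == '>' then pvGoA rest true          -- continue with flag set
    else if cat_start then c :: pvGoA rest cat_start
    else pvGoA rest cat_start

def get_problem_name_from_html (str : String) : String :=
  String.ofList (pvGoA str.toList false)

-- ===== PORT B =====
def get_problem_name_from_html_alt (str : String) : String :=
  let i := PySem.Str.find str ">"
  if i == -1 then ""
  else
    let j0 := PySem.Str.findFrom str "<" (i + 1)
    let j := if j0 == -1 then PySem.Str.len str else j0
    PySem.Str.replace (PySem.Str.slice str (some (i + 1)) (some j)) ">" ""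

-- ===== PRECONDITION & SPEC =====
def Spec_get_problem_name_from_html (str : String) (out : String) : Prop := out = get_problem_name_from_html_alt str
instance (str : String) (out : String) : Decidable (Spec_get_problem_name_from_html str out) := by unfold Spec_get_problem_name_from_html; infer_instance

-- ===== CLAIM (what is proved, stated in full; the proofs are below) =====
def Claim_equal_get_problem_name_from_html : Prop := ∀ (str : String), Dom_get_problem_name_from_html str → Spec_get_problem_name_from_html str (get_problem_name_from_html str)

-- ===== LEMMAS AND PROOFS =====

-- [c] is a prefix of l iff l starts with c
theorem pv_singleton_prefix (c : Char) (l : List Char) : [c] <+: l ↔ l.head? = some c := by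
  cases l <;> simp [List.prefix_cons_iff, eq_comm]

-- [c] is an infix of l iff c ∈ l
theorem pv_singleton_infix (c : Char) (l : List Char) : [c] <:+: l ↔ c ∈ l := by
  constructor
  · intro h; exact h.mem (by simp)
  · intro h
    obtain ⟨s, t, rfl⟩ := List.append_of_mem h
    exact ⟨s, t, by simp⟩

-- takeWhile-length characterisation of a first occurrence
theorem pv_takeWhile_len (c : Char) : ∀ (l : List Char) (n : Nat),
    l[n]? = some c → (∀ i < n, l[i]? ≠ some c) →
    (l.takeWhile (· != c)).length = n := by
  intro l
  induction l with
  | nil => intro n h _; simp at h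
  | cons a rest ih =>
    intro n h hmin
    cases n with
    | zero => simp at h; simp [List.takeWhile, h]
    | succ m =>
      have ha : a ≠ c := by
        intro hc; exact hmin 0 (Nat.succ_pos m) (by simp [hc])
      simp only [List.takeWhile_cons, bne_iff_ne, ne_eq, ha, not_false_eq_true, if_true]
      simp only [List.getElem?_cons_succ] at h
      have := ih m h (fun i hi hic => hmin (i+1) (by omega) (by simpa using hic))
      simp [this]

-- PySem.Chars.find on a single character, when present: the takeWhile length
theorem pv_find_singleton_mem (c : Char) (l : List Char) (h : c ∈ l) :
    PySem.Chars.find l [c] = ((l.takeWhile (· != c)).length : Int) := by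
  have h0 : 0 ≤ PySem.Chars.find l [c] :=
    (PySem.Chars.find_nonneg_iff l [c]).mpr ((pv_singleton_infix c l).mpr h)
  obtain ⟨hpre, hmin⟩ := PySem.Chars.find_spec h0
  set n := (PySem.Chars.find l [c]).toNat with hn
  have hget : l[n]? = some c := by
    have := (pv_singleton_prefix c (l.drop n)).mp hpre
    simpa [List.head?_drop] using this
  have hlt : ∀ i < n, l[i]? ≠ some c := by
    intro i hi hic
    exact hmin i hi ((pv_singleton_prefix c (l.drop i)).mpr (by simpa [List.head?_drop] using hic))
  have := pv_takeWhile_len c l n hget hlt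
  omega

-- PySem.Chars.find on a single character, when absent: -1
theorem pv_find_singleton_not_mem (c : Char) (l : List Char) (h : c ∉ l) :
    PySem.Chars.find l [c] = -1 := by
  exact (PySem.Chars.find_eq_neg_one_iff l [c]).mpr (fun hin => h ((pv_singleton_infix c l).mp hin))

-- replace '>' by '' is filter
theorem pv_replace_go_filter : ∀ (fuel : Nat) (l acc : List Char), l.length ≤ fuel →
    PySem.Chars.replace.go ['>'] [] fuel l acc = acc.reverse ++ l.filter (· != '>') := by
  intro fuel
  induction fuel with
  | zero =>
    intro l acc h
    have : l = [] := List.eq_nil_of_length_eq_zero (by omega)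
    subst this; simp [PySem.Chars.replace.go]
  | succ f ih =>
    intro l acc h
    cases l with
    | nil => simp [PySem.Chars.replace.go]
    | cons c t =>
      simp only [PySem.Chars.replace.go]
      by_cases hc : c = '>'
      · subst hc
        have : List.isPrefixOf ['>'] ('>' :: t) = true := by simp [List.isPrefixOf]
        rw [if_pos this]
        simpa using ih t acc (by simpa using h)
      · have : List.isPrefixOf ['>'] (c :: t) = false := by
          simp [List.isPrefixOf]; exact fun hcc => absurd hcc.symm hc
        rw [this]
        simp only [Bool.false_eq_true, if_false]
        rw [ih t (c :: acc) (by simpa using h)]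
        simp [hc]

theorem pv_replace_filter (l : List Char) :
    PySem.Chars.replace l ['>'] [] = l.filter (· != '>') := by
  simp only [PySem.Chars.replace, List.isEmpty_cons, Bool.false_eq_true, if_false]
  simpa using pv_replace_go_filter l.length l [] (le_refl _)

-- the first occurrence of c lies inside l
theorem pv_takeWhile_lt (c : Char) : ∀ (l : List Char), c ∈ l →
    (l.takeWhile (· != c)).length + 1 ≤ l.length := by
  intro l
  induction l with
  | nil => intro h; simp at h
  | cons a rest ih =>
    intro h
    by_cases ha : a = c
    · subst ha; simp
    · have hr : c ∈ rest := by
        rcases List.mem_cons.mp h with h' | h'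
        · exact absurd h'.symm ha
        · exact h'
      simp only [List.takeWhile_cons, bne_iff_ne, ne_eq, ha, not_false_eq_true, if_true,
        List.length_cons]
      have := ih hr
      omega

-- A's loop after the flag is set: take until '<', drop every '>'
theorem pv_goA_true (l : List Char) :
    pvGoA l true = (l.takeWhile (· != '<')).filter (· != '>') := by
  induction l with
  | nil => simp [pvGoA]
  | cons c rest ih =>
    by_cases h1 : c = '<'
    · subst h1; simp [pvGoA]
    · by_cases h2 : c = '>'
      · subst h2; simp [pvGoA, ih]
      · simp [pvGoA, h1, h2, ih]

-- A's loop before the flag is set, when '>' occurs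
theorem pv_goA_false_mem : ∀ (l : List Char), '>' ∈ l →
    pvGoA l false = pvGoA (l.drop ((l.takeWhile (· != '>')).length + 1)) true := by
  intro l
  induction l with
  | nil => intro h; simp at h
  | cons c rest ih =>
    intro h
    by_cases hc : c = '>'
    · subst hc; simp [pvGoA]
    · have hr : '>' ∈ rest := by
        rcases List.mem_cons.mp h with h' | h'
        · exact absurd h'.symm hc
        · exact h'
      simp [pvGoA, hc, ih hr]

-- A's loop before the flag is set, when '>' does not occur
theorem pv_goA_false_not_mem : ∀ (l : List Char), '>' ∉ l → pvGoA l false = [] := by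
  intro l
  induction l with
  | nil => intro _; simp [pvGoA]
  | cons c rest ih =>
    intro h
    have hc : ¬ (c = '>') := fun hc => h (by simp [hc])
    have hr : '>' ∉ rest := fun hr => h (by simp [hr])
    simp [pvGoA, hc, ih hr]

-- take of the takeWhile length is takeWhile
theorem pv_take_takeWhile (p : Char → Bool) (l : List Char) :
    l.take ((l.takeWhile p).length) = l.takeWhile p :=
  ((List.prefix_iff_eq_take.mp (List.takeWhile_prefix p))).symm

-- ===== VERDICT (by name: the statement is the Claim_ definition above) =====
theorem get_problem_name_from_html_spec : Claim_equal_get_problem_name_from_html := by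
  intro str _
  unfold Spec_get_problem_name_from_html get_problem_name_from_html get_problem_name_from_html_alt
  set l := str.toList with hl
  have hfind : PySem.Str.find str ">" = PySem.Chars.find l ['>'] := by
    simp [show (">" : String).toList = ['>'] from by decide, hl]
  by_cases hmem : '>' ∈ l
  · -- the capture starts after the first '>'
    set k := (l.takeWhile (· != '>')).length with hk
    have hik : PySem.Str.find str ">" = (k : Int) := by rw [hfind]; exact pv_find_singleton_mem _ _ hmem
    have hklen : k + 1 ≤ l.length := pv_takeWhile_lt '>' l hmem
    rw [hik]
    have hne : ¬ ((k : Int) == -1) = true := by simp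
    rw [if_neg hne]
    set t := l.drop (k + 1) with ht
    have hfrom : PySem.Str.findFrom str "<" ((k : Int) + 1) =
        if PySem.Chars.find t ['<'] = -1 then -1 else ((k:Int) + 1) + PySem.Chars.find t ['<'] := by
      have := PySem.Chars.findFrom_natCast l ['<'] (k+1) hklen
      simp only [PySem.Str.findFrom_eq, show ("<" : String).toList = ['<'] from by decide, ← hl]
      push_cast at this ⊢
      rw [this, ht]
    have hA : pvGoA l false = (t.takeWhile (· != '<')).filter (· != '>') := by
      rw [pv_goA_false_mem l hmem, ← hk, ← ht, pv_goA_true]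
    -- reduce the B side to lists
    apply String.toList_injective
    simp only [String.toList_ofList, PySem.Str.toList_replace,
      show (">" : String).toList = ['>'] from by decide,
      show ("" : String).toList = [] from by decide, PySem.Str.toList_slice,
      PySem.Chars.slice_eq_listSlice, ← hl]
    by_cases hmem2 : '<' ∈ t
    · set m := (t.takeWhile (· != '<')).length with hm
      have hfm : PySem.Chars.find t ['<'] = (m : Int) := pv_find_singleton_mem _ _ hmem2
      rw [hfrom, hfm]
      have : ¬ ((m:Int) = -1) := by omega
      rw [if_neg this]
      have hje : ¬ ((((k:Int)+1) + (m:Int)) == -1) = true := by simp; omega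
      rw [if_neg hje]
      have hsl : PySem.List.slice l (some ((k:Int)+1)) (some (((k:Int)+1) + (m:Int))) =
          (l.drop (k+1)).take m := by
        rw [PySem.List.slice_toNat _ (by omega) (by omega)]
        congr 1
        omega
      rw [hsl, ← ht, pv_take_takeWhile, pv_replace_filter, hA]
    · rw [hfrom, pv_find_singleton_not_mem _ _ hmem2]
      simp only [beq_self_eq_true, if_true]

      have hlen : PySem.Str.len str = (l.length : Int) := by simp [PySem.Str.len, hl]
      rw [hlen]
      have hsl : PySem.List.slice l (some ((k:Int)+1)) (some (l.length : Int)) =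
          (l.drop (k+1)).take (l.length - (k+1)) := by
        rw [PySem.List.slice_toNat _ (by omega) (by omega)]
        congr 1
      rw [hsl]
      have htt : (l.drop (k+1)).take (l.length - (k+1)) = t := by
        rw [ht]; apply List.take_of_length_le; simp
      rw [htt, pv_replace_filter, hA]
      congr 1
      exact List.takeWhile_eq_self_iff.mpr (fun x hx => by
        simp only [bne_iff_ne, ne_eq]
        intro hxc; exact hmem2 (hxc ▸ hx))
  · rw [hfind, pv_find_singleton_not_mem _ _ hmem]
    rw [pv_goA_false_not_mem l hmem]
    simp
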